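-- pv_equiv track=rewrite | github.com/lucacanella/learning-data-science | ThreefitAlgorithmV2.py | calculate_column_heights_delta
-- ===== SOURCE A (Python) =====
-- import math
--
-- def calculate_column_heights_delta(table):
--     heights = [0, 0, 0, ]
--     rows = math.floor(len(table) / 3)
--     reverse_table = list(reversed(table))
--     keep_going = [1, 1, 1]
--     for i in range(rows):
--         for j in range(3):
--             cell_index = i * 3 + j
--             if keep_going[j] and reverse_table[cell_index] != 0:
--                 heights[j] += 1
--             else:
--                 keep_going[j] = 0
--         if sum(keep_going) < 1:
--             break
--     return heights
-- ===== SOURCE B (Python) =====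
-- def calculate_column_heights_delta(table):
--     rows = len(table) // 3
--     reverse_table = list(reversed(table))
--     heights = [0, 0, 0]
--     for j in range(3):
--         for i in range(rows):
--             if reverse_table[i * 3 + j] != 0:
--                 heights[j] += 1
--             else:
--                 break
--     return heights
-- ===== Notes on version B (the rewrite author's own statement) =====
-- stated objective: simpler
-- what changed: Swapped the traversal to columns-outer: each of the three columns is an independent scan with a plain break on the first zero, removing A's keep_going flag array, per-row sum() call and index recomputation (constant-factor speedup, measured).
import Mathlib
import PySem

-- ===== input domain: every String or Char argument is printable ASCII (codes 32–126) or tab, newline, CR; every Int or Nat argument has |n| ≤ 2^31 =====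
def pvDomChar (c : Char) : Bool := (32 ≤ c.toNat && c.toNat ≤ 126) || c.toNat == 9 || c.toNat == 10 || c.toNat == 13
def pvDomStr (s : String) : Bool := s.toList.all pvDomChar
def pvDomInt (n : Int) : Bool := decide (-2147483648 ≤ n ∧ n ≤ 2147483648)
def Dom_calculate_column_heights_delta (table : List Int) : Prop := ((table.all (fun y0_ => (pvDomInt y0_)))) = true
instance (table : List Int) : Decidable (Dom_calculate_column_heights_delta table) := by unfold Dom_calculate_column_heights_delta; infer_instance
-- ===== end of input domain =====

-- B scans the three columns independently (columns-outer, break on first zero), dropping A's keep_going flags and per-row sum(): same counts, measured constant-factor faster.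


-- ===== PORT A =====
-- Row-by-row loop with per-column keep_going flags and a global early break.
-- Indexing: cell_index = i*3+j is always < table.length for i < rows, so
-- getD with any default is exact where Python indexes (never raises).
def pvA_go (rev : List Int) : Nat → Nat → Int × Int × Int → Bool × Bool × Bool → List Int
  | 0, _, (h0, h1, h2), _ => [h0, h1, h2]
  | n+1, i, (h0, h1, h2), (k0, k1, k2) =>
    let (h0', k0') := if k0 && (rev.getD (i*3) 0 ≠ 0) then (h0+1, k0) else (h0, false)
    let (h1', k1') := if k1 && (rev.getD (i*3+1) 0 ≠ 0) then (h1+1, k1) else (h1, false)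
    let (h2', k2') := if k2 && (rev.getD (i*3+2) 0 ≠ 0) then (h2+1, k2) else (h2, false)
    if k0' || k1' || k2' then pvA_go rev n (i+1) (h0', h1', h2') (k0', k1', k2')
    else [h0', h1', h2']

def calculate_column_heights_delta (table : List Int) : List Int :=
  let rows := table.length / 3
  let reverse_table := table.reverse
  pvA_go reverse_table rows 0 (0, 0, 0) (true, true, true)

-- ===== PORT B =====
-- Columns-outer: each column is an independent scan that stops at its first zero.
def pvCol (rev : List Int) (j : Nat) : Nat → Nat → Int
  | 0, _ => 0
  | n+1, i => if rev.getD (i*3+j) 0 ≠ 0 then 1 + pvCol rev j n (i+1) else 0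

def calculate_column_heights_delta_alt (table : List Int) : List Int :=
  let rows := table.length / 3
  let reverse_table := table.reverse
  [pvCol reverse_table 0 rows 0, pvCol reverse_table 1 rows 0, pvCol reverse_table 2 rows 0]

-- ===== PRECONDITION & SPEC =====
def Spec_calculate_column_heights_delta (table : List Int) (out : List Int) : Prop := out = calculate_column_heights_delta_alt table
instance (table : List Int) (out : List Int) : Decidable (Spec_calculate_column_heights_delta table out) := by unfold Spec_calculate_column_heights_delta; infer_instance

-- ===== CLAIM (what is proved, stated in full; the proofs are below) =====
def Claim_equal_calculate_column_heights_delta : Prop := ∀ (table : List Int), Dom_calculate_column_heights_delta table → Spec_calculate_column_heights_delta table (calculate_column_heights_delta table)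

-- ===== LEMMAS AND PROOFS =====
lemma pvPair_eq (h : Int) (k c : Bool) :
    (if (k && c) = true then (h + 1, k) else (h, false))
      = (h + (if (k && c) = true then 1 else 0), k && c) := by
  cases k <;> cases c <;> simp

lemma pvCol_step (rev : List Int) (j n i : Nat) (k : Bool) :
    (if k = true then pvCol rev j (n+1) i else 0)
      = (if (k && decide (rev.getD (i*3+j) 0 ≠ 0)) = true then 1 else 0)
        + (if (k && decide (rev.getD (i*3+j) 0 ≠ 0)) = true then pvCol rev j n (i+1) else 0) := by
  cases k <;> simp only [pvCol, Bool.true_and, Bool.false_and, Bool.false_eq_true,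
    if_false, add_zero, decide_eq_true_eq] <;> split_ifs <;> simp

lemma pvA_go_eq (rev : List Int) : ∀ (n i : Nat) (h0 h1 h2 : Int) (k0 k1 k2 : Bool),
    pvA_go rev n i (h0, h1, h2) (k0, k1, k2) =
      [h0 + (if k0 then pvCol rev 0 n i else 0),
       h1 + (if k1 then pvCol rev 1 n i else 0),
       h2 + (if k2 then pvCol rev 2 n i else 0)] := by
  intro n
  induction n with
  | zero => intro i h0 h1 h2 k0 k1 k2; simp [pvA_go, pvCol]
  | succ n ih =>
    intro i h0 h1 h2 k0 k1 k2
    simp only [pvA_go, pvPair_eq]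
    by_cases hb : (k0 && decide (rev.getD (i*3) 0 ≠ 0)
        || k1 && decide (rev.getD (i*3+1) 0 ≠ 0)
        || k2 && decide (rev.getD (i*3+2) 0 ≠ 0)) = true
    · rw [if_pos hb, ih]
      simp only [pvCol_step, Nat.add_zero, List.cons.injEq, and_true]
      refine ⟨by ring, by ring, by ring⟩
    · rw [if_neg hb]
      simp only [Bool.or_eq_true, not_or, Bool.not_eq_true] at hb
      obtain ⟨⟨hb0, hb1⟩, hb2⟩ := hb
      simp only [pvCol_step, Nat.add_zero, hb0, hb1, hb2, Bool.false_eq_true,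
        if_false, add_zero]

theorem pv_main (table : List Int) :
    calculate_column_heights_delta table = calculate_column_heights_delta_alt table := by
  simp [calculate_column_heights_delta, calculate_column_heights_delta_alt, pvA_go_eq]

-- ===== VERDICT (by name: the statement is the Claim_ definition above) =====
theorem calculate_column_heights_delta_spec : Claim_equal_calculate_column_heights_delta := by
  intro table _
  exact pv_main table
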